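-- pv_equiv track=rewrite | github.com/JoseBlanca/franklin | biolib/src/biolib/biolib_utils.py | remove_from_orf
-- ===== SOURCE A (Python) =====
-- def remove_from_orf(orf_dna, orf_prot, aminoacid='X'):
--     ''' It removes an aminoaacid from dna and protein seq'''
--     dna  = []
--     prot = []
--     pos       = 0
--     for letter in orf_prot:
--         if letter.upper() != aminoacid:
--             prot.append(letter)
--             dna.append(orf_dna[pos:pos + 3])
--         pos += 3
--     return "".join(dna), "".join(prot)
-- ===== SOURCE B (Python) =====
-- def remove_from_orf(orf_dna, orf_prot, aminoacid='X'):
--     # A single protein letter can never equal a string whose length is not 1,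
--     # so in that case everything is kept.
--     if len(aminoacid) != 1:
--         return orf_dna[:3 * len(orf_prot)], orf_prot
--     # Run-copying scan: locate each occurrence of the aminoacid with str.find on the
--     # upper-cased protein and copy the whole contiguous kept run between occurrences
--     # as one protein slice and one 3x-scaled dna slice.
--     up = orf_prot.upper()
--     n = len(orf_prot)
--     dna_parts, prot_parts = [], []
--     start = 0
--     while start <= n:
--         i = up.find(aminoacid, start)
--         if i == -1:
--             dna_parts.append(orf_dna[3 * start:3 * n])
--             prot_parts.append(orf_prot[start:n])
--             break
--         dna_parts.append(orf_dna[3 * start:3 * i])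
--         prot_parts.append(orf_prot[start:i])
--         start = i + 1
--     return ''.join(dna_parts), ''.join(prot_parts)
-- ===== Notes on version B (the rewrite author's own statement) =====
-- stated objective: faster
-- what changed: Replaces A's per-letter Python loop (running pos counter, one codon slice appended per kept letter) by a str.find-driven run-copying scan: each occurrence of the aminoacid in the upper-cased protein is located with find, and the whole contiguous kept run between occurrences is emitted as ONE protein slice plus ONE 3x-scaled dna slice; a len(aminoacid)!=1 early return covers the case where a single letter can never match.
import Mathlib
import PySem

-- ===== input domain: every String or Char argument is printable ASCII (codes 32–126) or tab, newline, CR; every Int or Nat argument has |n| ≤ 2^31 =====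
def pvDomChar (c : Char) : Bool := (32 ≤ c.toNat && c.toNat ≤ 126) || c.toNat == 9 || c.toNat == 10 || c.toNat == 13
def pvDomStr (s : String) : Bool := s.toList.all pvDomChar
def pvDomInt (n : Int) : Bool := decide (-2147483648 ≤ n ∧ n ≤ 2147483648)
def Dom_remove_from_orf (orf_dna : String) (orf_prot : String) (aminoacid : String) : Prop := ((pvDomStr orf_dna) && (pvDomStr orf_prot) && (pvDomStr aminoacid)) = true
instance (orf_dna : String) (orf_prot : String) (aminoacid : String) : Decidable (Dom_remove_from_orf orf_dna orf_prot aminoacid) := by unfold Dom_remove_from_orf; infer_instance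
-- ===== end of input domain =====

-- B replaces A's per-letter loop by a str.find-driven run-copying scan (whole kept runs emitted as single slices); objective: faster (constant-factor, measured).

-- ===== PORT A =====
-- loop over orf_prot with accumulators dna (list of codon slices), prot (kept letters) and the running pos
def remove_from_orf (orf_dna : String) (orf_prot : String) (aminoacid : String) : String × String :=
  let st := orf_prot.toList.foldl
    (fun (st : List (List Char) × List Char × Int) letter =>
      if String.mk [PySem.Chars.upperChar letter] ≠ aminoacid then
        (st.1 ++ [PySem.List.slice orf_dna.toList (some st.2.2) (some (st.2.2 + 3))],
         st.2.1 ++ [letter], st.2.2 + 3)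
      else
        (st.1, st.2.1, st.2.2 + 3))
    ([], [], 0)
  (String.mk st.1.flatten, String.mk st.2.1)

-- ===== PORT B =====
-- the while loop of Source B: starting the search at `start`, find the next occurrence of
-- the aminoacid in `up`; emit the kept run before it (prot slice + 3x-scaled dna slice)
-- and continue after it; on -1 emit the final run and stop.  The loop condition
-- `start <= n` bounds the iteration count by n+1, which is the fuel argument.
def pvScan (D P up am : List Char) : Nat → Nat → List (List Char) × List (List Char)
  | 0, _ => ([], [])
  | fuel + 1, start =>
      let i := PySem.Chars.findFrom up am ((start : Nat) : Int) none
      if i = -1 then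
        ([PySem.List.slice D (some (3 * (start : Int))) (some (3 * (P.length : Int)))],
         [PySem.List.slice P (some (start : Int)) (some (P.length : Int))])
      else
        let r := pvScan D P up am fuel (i.toNat + 1)
        (PySem.List.slice D (some (3 * (start : Int))) (some (3 * i)) :: r.1,
         PySem.List.slice P (some (start : Int)) (some i) :: r.2)

-- run-copying re-implementation: early return when len(aminoacid) != 1, else scan with find
def remove_from_orf_alt (orf_dna : String) (orf_prot : String) (aminoacid : String) : String × String :=
  if aminoacid.toList.length ≠ 1 then
    (String.mk (PySem.List.slice orf_dna.toList none (some (3 * (orf_prot.toList.length : Int)))),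
     orf_prot)
  else
    let up := (PySem.Str.upper orf_prot).toList
    let n := orf_prot.toList.length
    let r := pvScan orf_dna.toList orf_prot.toList up aminoacid.toList (n + 1) 0
    (String.mk r.1.flatten, String.mk r.2.flatten)

-- ===== PRECONDITION & SPEC =====
def Spec_remove_from_orf (orf_dna : String) (orf_prot : String) (aminoacid : String) (out : String × String) : Prop := out = remove_from_orf_alt orf_dna orf_prot aminoacid
instance (orf_dna : String) (orf_prot : String) (aminoacid : String) (out : String × String) : Decidable (Spec_remove_from_orf orf_dna orf_prot aminoacid out) := by unfold Spec_remove_from_orf; infer_instance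

-- ===== CLAIM (what is proved, stated in full; the proofs are below) =====
def Claim_equal_remove_from_orf : Prop := ∀ (orf_dna : String) (orf_prot : String) (aminoacid : String), Dom_remove_from_orf orf_dna orf_prot aminoacid → Spec_remove_from_orf orf_dna orf_prot aminoacid (remove_from_orf orf_dna orf_prot aminoacid)

-- ===== LEMMAS AND PROOFS =====

lemma pvToList_mk (l : List Char) : (String.mk l).toList = l := (String.ofList_eq.mp rfl).symm

lemma pvMk_toList (s : String) : String.mk s.toList = s := String.ofList_eq.mpr rfl

lemma pvMk_inj (a b : List Char) : String.mk a = String.mk b ↔ a = b := by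
  constructor
  · intro h
    have h2 := String.ofList_eq.mp h
    rw [h2, pvToList_mk]
  · intro h; rw [h]

-- does A keep this protein letter?
def pvKeep (amino : String) (c : Char) : Bool := decide (String.mk [PySem.Chars.upperChar c] ≠ amino)

-- the codon A emits for protein index k
def pvCodon (D : List Char) (k : Nat) : List Char := (D.drop (3 * k)).take 3

-- reference result: list of kept codons (and, via filter, kept letters) of the suffix starting at s
def pvSpecL (D : List Char) (keep : Char → Bool) : List Char → Nat → List (List Char)
  | [], _ => []
  | c :: t, s => (if keep c then [pvCodon D s] else []) ++ pvSpecL D keep t (s + 1)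

lemma pvSpecL_append (D : List Char) (keep : Char → Bool) :
    ∀ (xs ys : List Char) (s : Nat),
    pvSpecL D keep (xs ++ ys) s = pvSpecL D keep xs s ++ pvSpecL D keep ys (s + xs.length) := by
  intro xs
  induction xs with
  | nil => simp [pvSpecL]
  | cons c t ih =>
    intro ys s
    have hidx : s + 1 + t.length = s + (t.length + 1) := by omega
    simp only [List.cons_append, pvSpecL, ih, hidx, List.length_cons, List.append_assoc]

-- on an all-kept run the emitted codons concatenate to one contiguous slice of D
lemma pvRunAll (D : List Char) (keep : Char → Bool) :
    ∀ (xs : List Char) (s : Nat), (∀ c ∈ xs, keep c = true) →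
    (pvSpecL D keep xs s).flatten = (D.drop (3 * s)).take (3 * xs.length) := by
  intro xs
  induction xs with
  | nil => simp [pvSpecL]
  | cons c t ih =>
    intro s h
    have hc : keep c = true := h c (by simp)
    have ht : ∀ x ∈ t, keep x = true := fun x hx => h x (by simp [hx])
    have h3 : 3 * (t.length + 1) = 3 + 3 * t.length := by omega
    have h4 : 3 * (s + 1) = 3 + 3 * s := by omega
    simp only [pvSpecL, hc, if_pos, List.length_cons, List.flatten_append, List.flatten_cons,
      List.flatten_nil, List.append_nil, ih (s + 1) ht, pvCodon, h3, List.take_add,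
      List.drop_drop, h4]
    have h5 : (3 : Nat) + 3 * s = 3 * s + 3 := by omega
    rw [h5]

-- characterisation of A's loop
lemma pvA (D : List Char) (amino : String) :
    ∀ (P : List Char) (s : Nat) (d : List (List Char)) (q : List Char),
    P.foldl
      (fun (st : List (List Char) × List Char × Int) letter =>
        if String.mk [PySem.Chars.upperChar letter] ≠ amino then
          (st.1 ++ [PySem.List.slice D (some st.2.2) (some (st.2.2 + 3))],
           st.2.1 ++ [letter], st.2.2 + 3)
        else
          (st.1, st.2.1, st.2.2 + 3))
      (d, q, (3 * (s : Int))) =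
    (d ++ pvSpecL D (pvKeep amino) P s, q ++ P.filter (pvKeep amino),
     3 * ((s : Int) + (P.length : Int))) := by
  intro P
  induction P with
  | nil => intro s d q; simp [pvSpecL]
  | cons c t ih =>
    intro s d q
    have hpos : (3 * (s : Int)) + 3 = 3 * (((s + 1 : Nat)) : Int) := by push_cast; ring
    have hslice : PySem.List.slice D (some (3 * (s : Int))) (some (3 * (s : Int) + 3)) = pvCodon D s := by
      have h1 : (3 * (s : Int)) = ((3 * s : Nat) : Int) := by push_cast; ring
      have h2 : (3 * (s : Int) + 3) = ((3 * s : Nat) : Int) + ((3 : Nat) : Int) := by push_cast; ring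
      rw [h2, h1, PySem.List.slice_natCast_add]
      rfl
    by_cases h : String.mk [PySem.Chars.upperChar c] ≠ amino
    · rw [List.foldl_cons, if_pos h, hslice, hpos, ih (s + 1)]
      have hk : pvKeep amino c = true := by simp [pvKeep, h]
      simp only [pvSpecL, hk, if_pos, List.filter_cons, List.length_cons, Prod.mk.injEq]
      refine ⟨by simp, by simp, by push_cast; ring⟩
    · rw [List.foldl_cons, if_neg h, hpos, ih (s + 1)]
      have hk : pvKeep amino c = false := by simp [pvKeep] at h ⊢; exact h
      simp only [pvSpecL, hk, List.filter_cons, List.length_cons, Prod.mk.injEq]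
      refine ⟨by simp, by simp, by push_cast; ring⟩

-- a one-character prefix is just the head
lemma pvSinglePrefix (a : Char) (l : List Char) : [a] <+: l ↔ l.head? = some a := by
  cases l with
  | nil => simp
  | cons b t => simp [List.cons_prefix_cons, eq_comm]

-- a one-character infix is membership
lemma pvSingleInfix (a : Char) (l : List Char) : [a] <:+: l ↔ a ∈ l := by
  constructor
  · intro h; exact List.singleton_sublist.mp h.sublist
  · intro h
    obtain ⟨s, t, rfl⟩ := List.append_of_mem h
    exact ⟨s, t, by simp⟩

-- characterisation of B's scan loop (single-character aminoacid a0, up = upper-cased P)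
lemma pvB (D P : List Char) (a0 : Char) :
    ∀ (fuel start : Nat), start ≤ P.length → P.length < fuel + start →
    ((pvScan D P (P.map PySem.Chars.upperChar) [a0] fuel start).1.flatten =
        (pvSpecL D (fun c => decide (PySem.Chars.upperChar c ≠ a0)) (P.drop start) start).flatten
      ∧ (pvScan D P (P.map PySem.Chars.upperChar) [a0] fuel start).2.flatten =
        (P.drop start).filter (fun c => decide (PySem.Chars.upperChar c ≠ a0))) := by
  intro fuel
  induction fuel with
  | zero => intro start h1 h2; omega
  | succ fuel ih =>
    intro start h1 h2
    set keep : Char → Bool := fun c => decide (PySem.Chars.upperChar c ≠ a0) with hkeep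
    have hup : (P.map PySem.Chars.upperChar).length = P.length := by simp
    have hk : start ≤ (P.map PySem.Chars.upperChar).length := by omega
    by_cases hfind : PySem.Chars.findFrom (P.map PySem.Chars.upperChar) [a0] ((start : Nat) : Int) none = -1
    · -- no further occurrence: the whole suffix is kept and copied as one slice
      have hnin : a0 ∉ (P.map PySem.Chars.upperChar).drop start := by
        intro hmem
        exact ((PySem.Chars.findFrom_natCast_eq_neg_one_iff _ _ start hk).mp hfind)
          ((pvSingleInfix a0 _).mpr hmem)
      have hall : ∀ c ∈ P.drop start, keep c = true := by
        intro c hc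
        by_contra hne
        simp only [hkeep, decide_not] at hne
        have : PySem.Chars.upperChar c = a0 := by
          by_contra hx; simp [hx] at hne
        exact hnin (by rw [← List.map_drop, ← this]; exact List.mem_map_of_mem hc)
      constructor
      · simp only [pvScan]
        rw [if_pos hfind]
        have h1' : (3 * (start : Int)) = ((3 * start : Nat) : Int) := by push_cast; ring
        have h2' : (3 * (P.length : Int)) = ((3 * P.length : Nat) : Int) := by push_cast; ring
        rw [h1', h2', pvRunAll D keep (P.drop start) start hall]
        simp only [List.flatten_cons, List.flatten_nil, List.append_nil,
          PySem.List.slice_natCast, List.length_drop]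
        congr 1
        omega
      · simp only [pvScan]
        rw [if_pos hfind]
        have : PySem.List.slice P (some ((start : Nat) : Int)) (some ((P.length : Nat) : Int)) =
            (P.drop start).take (P.length - start) := by
          rw [PySem.List.slice_natCast]
        rw [this]
        have htake : (P.drop start).take (P.length - start) = P.drop start := by
          apply List.take_of_length_le; simp
        rw [htake]
        simp only [List.flatten_cons, List.flatten_nil, List.append_nil]
        symm
        exact List.filter_eq_self.mpr hall
    · -- occurrence at j: copy the kept run [start, j) as one slice, skip j, continue at j+1
      obtain ⟨hge, hpre, hmin⟩ :=
        PySem.Chars.findFrom_natCast_spec (P.map PySem.Chars.upperChar) [a0] start hk hfind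
      set i := PySem.Chars.findFrom (P.map PySem.Chars.upperChar) [a0] ((start : Nat) : Int) none with hi
      set j := i.toNat with hj
      have hij : i = (j : Int) := by omega
      have hsj : start ≤ j := by omega
      have hjget : (P.map PySem.Chars.upperChar)[j]? = some a0 := by
        rw [← List.head?_drop]; exact (pvSinglePrefix a0 _).mp hpre
      have hjlt : j < P.length := by
        by_contra hx
        rw [List.getElem?_eq_none (by simp; omega)] at hjget
        simp at hjget
      have hupj : PySem.Chars.upperChar P[j] = a0 := by
        rw [List.getElem?_map, List.getElem?_eq_getElem hjlt] at hjget
        simpa using hjget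
      have hkeepj : keep P[j] = false := by simp [hkeep, hupj]
      set xs : List Char := (P.drop start).take (j - start) with hxs
      have hxslen : xs.length = j - start := by
        simp [hxs]; omega
      have hxsall : ∀ c ∈ xs, keep c = true := by
        intro c hc
        obtain ⟨k, hklt, hck⟩ := List.mem_iff_getElem.mp hc
        have hk2 : k < j - start := by omega
        have hcp : c = P[start + k]'(by omega) := by
          rw [← hck]; simp [hxs, List.getElem_take, List.getElem_drop]
        have hnp : ¬ [a0] <+: (P.map PySem.Chars.upperChar).drop (start + k) :=
          hmin (start + k) (by omega) (by omega)
        rw [pvSinglePrefix, List.head?_drop] at hnp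
        by_contra hne
        simp only [hkeep, decide_not] at hne
        have hupc : PySem.Chars.upperChar c = a0 := by
          by_contra hx; simp [hx] at hne
        apply hnp
        rw [List.getElem?_map, List.getElem?_eq_getElem (by omega)]
        simp [← hcp, hupc]
      have hsplit : P.drop start = xs ++ P[j] :: P.drop (j + 1) := by
        rw [hxs, ← List.drop_eq_getElem_cons hjlt]
        have : P.drop j = (P.drop start).drop (j - start) := by
          rw [List.drop_drop]; congr 1; omega
        rw [this, List.take_append_drop]
      obtain ⟨ihd, ihp⟩ := ih (j + 1) (by omega) (by omega)
      constructor
      · simp only [pvScan]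
        rw [← hi, if_neg hfind]
        simp only [List.flatten_cons]
        rw [← hj, ihd, hsplit, pvSpecL_append, List.flatten_append,
          pvSpecL, hkeepj]
        simp only [Bool.false_eq_true, if_false, List.nil_append, hxslen]
        have hjs : start + (j - start) = j := by omega
        rw [hjs]
        congr 1
        rw [pvRunAll D keep xs start hxsall, hxslen]
        have h1' : (3 * (start : Int)) = ((3 * start : Nat) : Int) := by push_cast; ring
        have h2' : (3 * i) = ((3 * j : Nat) : Int) := by rw [hij]; push_cast; ring
        rw [h1', h2', PySem.List.slice_natCast]
        congr 1
        omega
      · simp only [pvScan]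
        rw [← hi, if_neg hfind]
        simp only [List.flatten_cons]
        rw [← hj, ihp, hsplit, List.filter_append, List.filter_cons, hkeepj]
        simp only [Bool.false_eq_true, if_false]
        congr 1
        rw [hij, PySem.List.slice_natCast, List.filter_eq_self.mpr hxsall, hxs]

-- ===== VERDICT (by name: the statement is the Claim_ definition above) =====
theorem remove_from_orf_spec : Claim_equal_remove_from_orf := by
  intro dna prot amino _
  unfold Spec_remove_from_orf remove_from_orf remove_from_orf_alt
  have h0 : (0 : Int) = 3 * (((0 : Nat)) : Int) := by norm_num
  rw [h0, pvA dna.toList amino prot.toList 0 [] []]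
  by_cases hlen : amino.toList.length ≠ 1
  · -- multi-char (or empty) aminoacid: nothing is ever removed
    rw [if_pos hlen]
    have hall : ∀ c ∈ prot.toList, pvKeep amino c = true := by
      intro c _
      simp only [pvKeep, decide_eq_true_eq]
      intro hx
      apply hlen
      rw [← hx, pvToList_mk]
      rfl
    have h2' : (3 * (prot.toList.length : Int)) = ((3 * prot.toList.length : Nat) : Int) := by
      push_cast; ring
    rw [h2', PySem.List.slice_to_natCast]
    simp only [List.nil_append, Prod.mk.injEq]
    constructor
    · rw [pvRunAll dna.toList (pvKeep amino) prot.toList 0 hall]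
      simp
    · rw [List.filter_eq_self.mpr hall]
      exact pvMk_toList prot
  · -- single-char aminoacid: the find-driven scan
    rw [if_neg hlen]
    simp only [ne_eq, not_not] at hlen
    obtain ⟨a0, ha0⟩ := List.length_eq_one_iff.mp hlen
    have hmk : amino = String.mk [a0] := by rw [← ha0]; exact (pvMk_toList amino).symm
    have hkeq : pvKeep amino = fun c => decide (PySem.Chars.upperChar c ≠ a0) := by
      funext c
      simp [pvKeep, hmk, pvMk_inj]
    have hup : (PySem.Str.upper prot).toList = prot.toList.map PySem.Chars.upperChar := by
      rw [PySem.Str.toList_upper]; rfl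
    obtain ⟨hd, hp⟩ := pvB dna.toList prot.toList a0 (prot.toList.length + 1) 0
      (by omega) (by omega)
    simp only [hup, ha0] at *
    simp only [List.nil_append, Prod.mk.injEq]
    rw [hkeq]
    constructor
    · rw [hd]; simp
    · rw [hp]; simp
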